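-- pv_equiv track=rewrite | github.com/modenicheng/sr_text_search | main.py | find_continuous_subarray
-- ===== SOURCE A (Python) =====
-- from typing import List
--
-- def find_continuous_subarray(arr: List[int], target: int) -> List[int]:
--     """
--     Find the longest continuous integer subarray containing target in a sorted non-contiguous array.
--     在已排序的不连续数组中找到包含目标值的最长连续整数子数组。
--
--     This function identifies continuous sequences within a sorted array that may have gaps,
--     and returns the longest continuous sequence that contains the target value.
--     该函数识别可能存在间隔的已排序数组中的连续序列，并返回包含目标值的最长连续序列。
--
--     Args:
--         arr (List[int]): A sorted list of integers that may have gaps between values.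
--                         可能存在值之间间隔的已排序整数列表。
--         target (int): The integer value to find within a continuous subarray.
--                      要在连续子数组中找到的整数值。
--
--     Returns:
--         List[int]: The longest continuous subarray containing the target value.
--                   Returns an empty list if the target is not found in the array.
--                   包含目标值的最长连续子数组。如果目标值不在数组中，则返回空列表。
--
--     Examples:
--         >>> find_continuous_subarray([1, 2, 5, 6, 7, 10], 6)
--         [5, 6, 7]
--
--         >>> find_continuous_subarray([1, 3, 5, 7], 4)
--         []
--     """
--     if not arr:
--         return []
--
--     # 先把所有连续区间切开
--     ranges = []  # 每个元素是一个连续区间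
--     start = arr[0]
--     for i in range(1, len(arr)):
--         if arr[i] != arr[i - 1] + 1:
--             ranges.append(list(range(start, arr[i - 1] + 1)))
--             start = arr[i]
--     # 补上最后一个区间
--     ranges.append(list(range(start, arr[-1] + 1)))
--
--     # 找到包含 target 的区间
--     for r in ranges:
--         if target in r:
--             return r
--     return []
-- ===== SOURCE B (Python) =====
-- def find_continuous_subarray(arr, target):
--     # Locate the first occurrence of target, then expand outward to the
--     # boundaries of its consecutive run -- no other runs are ever built.
--     if target not in arr:
--         return []
--     i = arr.index(target)
--     pre, post = arr[:i], arr[i + 1:]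
--     left = []
--     v = target
--     for x in reversed(pre):
--         if x + 1 == v:
--             left.append(x)
--             v = x
--         else:
--             break
--     right = []
--     v = target
--     for x in post:
--         if x == v + 1:
--             right.append(x)
--             v = x
--         else:
--             break
--     return left[::-1] + [target] + right
-- ===== Notes on version B (the rewrite author's own statement) =====
-- stated objective: faster
-- what changed: A splits the whole array into all consecutive runs and then scans them for the target; B locates the first occurrence of target and expands outward to its run's boundaries, never materialising any other run.
import Mathlib
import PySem

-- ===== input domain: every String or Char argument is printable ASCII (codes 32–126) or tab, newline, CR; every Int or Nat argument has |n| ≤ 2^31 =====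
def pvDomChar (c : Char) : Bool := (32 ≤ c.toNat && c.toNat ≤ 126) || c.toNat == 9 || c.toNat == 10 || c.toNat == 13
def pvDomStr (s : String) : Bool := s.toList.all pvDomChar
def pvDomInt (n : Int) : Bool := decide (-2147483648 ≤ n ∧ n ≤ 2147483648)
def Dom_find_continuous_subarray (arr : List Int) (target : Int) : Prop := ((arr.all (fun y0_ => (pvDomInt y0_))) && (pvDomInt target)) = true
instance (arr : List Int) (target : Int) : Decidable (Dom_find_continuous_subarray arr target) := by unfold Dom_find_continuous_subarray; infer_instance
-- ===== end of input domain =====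

-- B replaces A's decomposition of the whole array into all consecutive runs by locating the first
-- occurrence of target and expanding outward to its run's boundaries (alternative algorithm).

-- ===== PORT A =====
-- A's final loop: 'for r in ranges: if target in r: return r' / 'return []'
def pvFirstContaining (target : Int) : List (List Int) → List Int
  | [] => []
  | r :: rs => if target ∈ r then r else pvFirstContaining target rs

-- A's 'for i in range(1, len(arr))' loop as index recursion over the same state (ranges, start);
-- the indices i and i-1 are always in range here, so getD is exact for arr[i] / arr[i-1]
def pvALoop (arr : List Int) (i : Nat) (ranges : List (List Int)) (start : Int) :
    List (List Int) × Int :=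
  if h : i < arr.length then
    if arr.getD i 0 ≠ arr.getD (i - 1) 0 + 1 then
      pvALoop arr (i + 1) (ranges ++ [PySem.List.pyRange start (arr.getD (i - 1) 0 + 1) 1]) (arr.getD i 0)
    else
      pvALoop arr (i + 1) ranges start
  else (ranges, start)
termination_by arr.length - i

def find_continuous_subarray (arr : List Int) (target : Int) : List Int :=
  match arr with
  | [] => []
  | a0 :: _ =>
    let st := pvALoop arr 1 [] a0
    -- arr[-1] is arr.getD (arr.length - 1) 0 here since arr is nonempty
    let ranges := st.1 ++ [PySem.List.pyRange st.2 (arr.getD (arr.length - 1) 0 + 1) 1]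
    pvFirstContaining target ranges

-- ===== PORT B =====
-- 'for x in reversed(pre): if x + 1 == v: left.append(x); v = x else: break'
def pvExtL (v : Int) : List Int → List Int
  | [] => []
  | x :: rest => if x + 1 = v then x :: pvExtL x rest else []

-- 'for x in post: if x == v + 1: right.append(x); v = x else: break'
def pvExtR (v : Int) : List Int → List Int
  | [] => []
  | x :: rest => if x = v + 1 then x :: pvExtR x rest else []

def find_continuous_subarray_alt (arr : List Int) (target : Int) : List Int :=
  if target ∈ arr then
    match PySem.List.index? arr target with
    | some i =>
      let pre := PySem.List.slice arr none (some (i : Int))          -- arr[:i]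
      let post := PySem.List.slice arr (some ((i : Int) + 1)) none   -- arr[i+1:]
      let left := pvExtL target pre.reverse
      let right := pvExtR target post
      left.reverse ++ target :: right                                -- left[::-1] + [target] + right
    | none => []   -- unreachable: target ∈ arr
  else []

-- ===== PRECONDITION & SPEC =====
def Spec_find_continuous_subarray (arr : List Int) (target : Int) (out : List Int) : Prop := out = find_continuous_subarray_alt arr target
instance (arr : List Int) (target : Int) (out : List Int) : Decidable (Spec_find_continuous_subarray arr target out) := by unfold Spec_find_continuous_subarray; infer_instance

-- ===== CLAIM (what is proved, stated in full; the proofs are below) =====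
def Claim_equal_find_continuous_subarray : Prop := ∀ (arr : List Int) (target : Int), Dom_find_continuous_subarray arr target → Spec_find_continuous_subarray arr target (find_continuous_subarray arr target)

-- ===== LEMMAS AND PROOFS =====

-- reference decomposition of the rest of the list into consecutive runs, given the current
-- run's start value and the previous value
def pvRunsSpec (start prev : Int) : List Int → List (List Int)
  | [] => [PySem.List.pyRange start (prev + 1) 1]
  | a :: rest =>
    if a ≠ prev + 1 then PySem.List.pyRange start (prev + 1) 1 :: pvRunsSpec a a rest
    else pvRunsSpec start a rest

-- first-occurrence split: some (pre, post) with l = pre ++ t :: post and t ∉ pre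
def pvSplitFirst (t : Int) : List Int → Option (List Int × List Int)
  | [] => none
  | a :: rest =>
    if a = t then some ([], rest)
    else (pvSplitFirst t rest).map (fun p => (a :: p.1, p.2))

-- structural form of B
def pvBStruct (t : Int) (l : List Int) : List Int :=
  match pvSplitFirst t l with
  | none => []
  | some (pre, post) => (pvExtL t pre.reverse).reverse ++ t :: pvExtR t post

lemma pvALoop_runs (arr : List Int) (i : Nat) (h1 : 1 ≤ i) (h2 : i ≤ arr.length)
    (ranges : List (List Int)) (start : Int) :
    (pvALoop arr i ranges start).1 ++
      [PySem.List.pyRange (pvALoop arr i ranges start).2 (arr.getD (arr.length - 1) 0 + 1) 1]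
    = ranges ++ pvRunsSpec start (arr.getD (i - 1) 0) (arr.drop i) := by
  obtain ⟨k, hk⟩ : ∃ k, arr.length - i = k := ⟨_, rfl⟩
  induction k generalizing i ranges start with
  | zero =>
    have hi : i = arr.length := by omega
    rw [pvALoop, dif_neg (by omega)]
    rw [List.drop_eq_nil_iff.mpr (by omega)]
    simp [pvRunsSpec, hi]
  | succ k ih =>
    have hi : i < arr.length := by omega
    rw [pvALoop, dif_pos hi]
    have hdrop : arr.drop i = arr[i] :: arr.drop (i + 1) := List.drop_eq_getElem_cons hi
    have hget : arr.getD i 0 = arr[i] := List.getD_eq_getElem _ _ hi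
    rw [hdrop]
    simp only [pvRunsSpec, hget]
    by_cases hc : arr[i] ≠ arr.getD (i - 1) 0 + 1
    · rw [if_pos hc, if_pos hc]
      rw [ih (i + 1) (by omega) (by omega) _ _ (by omega)]
      simp [List.getElem?_eq_getElem hi, List.append_assoc]
    · rw [if_neg hc, if_neg hc]
      rw [ih (i + 1) (by omega) (by omega) _ _ (by omega)]
      simp [List.getElem?_eq_getElem hi]

lemma pvA_eq (a0 : Int) (rest : List Int) (t : Int) :
    find_continuous_subarray (a0 :: rest) t = pvFirstContaining t (pvRunsSpec a0 a0 rest) := by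
  have h := pvALoop_runs (a0 :: rest) 1 le_rfl (by simp) [] a0
  simp at h
  simp only [find_continuous_subarray, List.length_cons, Nat.add_sub_cancel]
  rw [List.getD_eq_getElem _ _ (by simp), h]

lemma pvSplitFirst_of_notMem {t : Int} {l : List Int} (h : t ∉ l) : pvSplitFirst t l = none := by
  induction l with
  | nil => rfl
  | cons a rest ih =>
    simp only [List.mem_cons, not_or] at h
    simp [pvSplitFirst, Ne.symm h.1, ih h.2]

lemma pvSplitFirst_append {t : Int} {pre suf : List Int} (h : t ∉ pre) :
    pvSplitFirst t (pre ++ t :: suf) = some (pre, suf) := by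
  induction pre with
  | nil => simp [pvSplitFirst]
  | cons a rest ih =>
    simp only [List.mem_cons, not_or] at h
    simp [pvSplitFirst, Ne.symm h.1, ih h.2]

lemma pvB_eq (arr : List Int) (t : Int) :
    find_continuous_subarray_alt arr t = pvBStruct t arr := by
  by_cases hm : t ∈ arr
  · have hs : ∃ k, PySem.List.index? arr t = some k :=
      Option.isSome_iff_exists.mp ((PySem.List.index?_isSome_iff arr t).mpr hm)
    obtain ⟨k, hk⟩ := hs
    obtain ⟨pre, suf, harr, hlen, hnot⟩ := (PySem.List.index?_eq_some_iff arr t k).mp hk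
    unfold find_continuous_subarray_alt
    rw [if_pos hm, hk]
    have h1 : PySem.List.slice arr none (some (k : Int)) = pre := by
      rw [PySem.List.slice_to_natCast, harr, ← hlen, List.take_left]
    have h2 : PySem.List.slice arr (some ((k : Int) + 1)) none = suf := by
      have hc : ((k : Int) + 1) = ((k + 1 : Nat) : Int) := by push_cast; ring
      rw [hc, PySem.List.slice_from_natCast, harr, ← hlen]
      have he : pre ++ t :: suf = (pre ++ [t]) ++ suf := by simp
      have hl : pre.length + 1 = (pre ++ [t]).length := by simp
      rw [he, hl, List.drop_left]
    show (pvExtL t (PySem.List.slice arr none (some (k : Int))).reverse).reverse ++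
        t :: pvExtR t (PySem.List.slice arr (some ((k : Int) + 1)) none) = pvBStruct t arr
    rw [h1, h2]
    unfold pvBStruct
    rw [harr, pvSplitFirst_append hnot]
  · unfold find_continuous_subarray_alt pvBStruct
    rw [if_neg hm, pvSplitFirst_of_notMem hm]

lemma pvExtL_append (v : Int) (xs ys : List Int) :
    pvExtL v (xs ++ ys) =
      if pvExtL v xs = xs then xs ++ pvExtL (v - xs.length) ys else pvExtL v xs := by
  induction xs generalizing v with
  | nil => simp [pvExtL]
  | cons x xs ih =>
    by_cases hx : x + 1 = v
    · simp only [List.cons_append, pvExtL, if_pos hx, ih x]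
      by_cases hfull : pvExtL x xs = xs
      · have hc2 : x - (xs.length : Int) = v - ((xs.length : Int) + 1) := by omega
        simp [hfull, hc2]
      · simp [hfull]
    · simp [pvExtL, hx]

lemma pvExtL_rev_range_full (k : Nat) (s : Int) :
    pvExtL (s + k) ((PySem.List.pyRange s (s + k) 1).reverse)
      = (PySem.List.pyRange s (s + k) 1).reverse := by
  induction k with
  | zero => simp [pvExtL]
  | succ n ih =>
    have h1 : s + ((n + 1 : Nat) : Int) = (s + (n : Nat)) + 1 := by push_cast; ring
    rw [h1, PySem.List.pyRange_one_succ_right (by omega)]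
    have h2 : (PySem.List.pyRange s (s + (n : Nat)) 1 ++ [s + (n : Nat)]).reverse
        = (s + (n : Nat)) :: (PySem.List.pyRange s (s + (n : Nat)) 1).reverse := by simp
    rw [h2]
    simp [pvExtL, ih]

lemma pvExtL_rev_range_full' {s v : Int} (h : s ≤ v) :
    pvExtL v ((PySem.List.pyRange s v 1).reverse) = (PySem.List.pyRange s v 1).reverse := by
  obtain ⟨k, rfl⟩ : ∃ k : Nat, v = s + k := ⟨(v - s).toNat, by omega⟩
  exact pvExtL_rev_range_full k s

lemma pvExtL_rev_range_nil {s prev v : Int} (hs : s ≤ prev) (hv : v ≠ prev + 1) :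
    pvExtL v ((PySem.List.pyRange s (prev + 1) 1).reverse) = [] := by
  rw [PySem.List.pyRange_one_succ_right hs]
  have h2 : (PySem.List.pyRange s prev 1 ++ [prev]).reverse
      = prev :: (PySem.List.pyRange s prev 1).reverse := by simp
  rw [h2]
  simp only [pvExtL]
  rw [if_neg (by omega)]

lemma pvG (t : Int) : ∀ (l : List Int) (s prev : Int), s ≤ prev →
    pvFirstContaining t (pvRunsSpec s prev l) =
      if s ≤ t ∧ t ≤ prev then PySem.List.pyRange s (prev + 1) 1 ++ pvExtR prev l
      else
        match pvSplitFirst t l with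
        | none => []
        | some (pre, post) =>
          (pvExtL t (pre.reverse ++ (PySem.List.pyRange s (prev + 1) 1).reverse)).reverse
            ++ t :: pvExtR t post := by
  intro l
  induction l with
  | nil =>
    intro s prev hs
    simp only [pvRunsSpec, pvFirstContaining, pvSplitFirst, pvExtR]
    by_cases h : s ≤ t ∧ t ≤ prev
    · rw [if_pos (by rw [PySem.List.mem_pyRange_one]; omega), if_pos h]; simp
    · rw [if_neg (by rw [PySem.List.mem_pyRange_one]; omega), if_neg h]
  | cons a rest ih =>
    intro s prev hs
    by_cases hbr : a = prev + 1
    · -- consecutive: the current run continues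
      subst hbr
      have hrs : pvRunsSpec s prev ((prev + 1) :: rest) = pvRunsSpec s (prev + 1) rest := by
        simp [pvRunsSpec]
      rw [hrs, ih s (prev + 1) (by omega)]
      by_cases h1 : s ≤ t ∧ t ≤ prev
      · rw [if_pos (by omega : s ≤ t ∧ t ≤ prev + 1), if_pos h1]
        rw [PySem.List.pyRange_one_succ_right (by omega : s ≤ prev + 1)]
        simp [pvExtR]
      · by_cases h2 : t = prev + 1
        · rw [if_pos (by omega : s ≤ t ∧ t ≤ prev + 1), if_neg h1]
          have hsp : pvSplitFirst t ((prev + 1) :: rest) = some ([], rest) := by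
            simp [pvSplitFirst, h2]
          rw [hsp]
          simp only [List.reverse_nil, List.nil_append]
          rw [h2, pvExtL_rev_range_full' (by omega : s ≤ prev + 1)]
          rw [PySem.List.pyRange_one_succ_right (by omega : s ≤ prev + 1)]
          simp
        · rw [if_neg (by omega), if_neg h1]
          have hsp : pvSplitFirst t ((prev + 1) :: rest)
              = (pvSplitFirst t rest).map (fun p => ((prev + 1) :: p.1, p.2)) := by
            simp [pvSplitFirst, Ne.symm h2]
          rw [hsp]
          cases hsr : pvSplitFirst t rest with
          | none => simp
          | some p =>
            simp only [Option.map_some]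
            have harg : p.1.reverse ++ (PySem.List.pyRange s (prev + 1 + 1) 1).reverse
                = ((prev + 1) :: p.1).reverse ++ (PySem.List.pyRange s (prev + 1) 1).reverse := by
              rw [PySem.List.pyRange_one_succ_right (by omega : s ≤ prev + 1)]
              simp
            rw [harg]
    · -- break: a starts a new run
      have hrs : pvRunsSpec s prev (a :: rest)
          = PySem.List.pyRange s (prev + 1) 1 :: pvRunsSpec a a rest := by
        simp [pvRunsSpec, hbr]
      rw [hrs]
      simp only [pvFirstContaining]
      by_cases hmem : s ≤ t ∧ t ≤ prev
      · rw [if_pos (by rw [PySem.List.mem_pyRange_one]; omega), if_pos hmem]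
        simp [pvExtR, hbr]
      · rw [if_neg (by rw [PySem.List.mem_pyRange_one]; omega), if_neg hmem]
        rw [ih a a le_rfl]
        by_cases h2 : t = a
        · rw [if_pos (by omega : a ≤ t ∧ t ≤ a)]
          have hsp : pvSplitFirst t (a :: rest) = some ([], rest) := by
            simp [pvSplitFirst, h2]
          rw [hsp]
          simp only [List.reverse_nil, List.nil_append]
          rw [pvExtL_rev_range_nil hs (by omega : t ≠ prev + 1)]
          rw [h2, PySem.List.pyRange_one_succ_right (le_rfl : a ≤ a)]
          simp [PySem.List.pyRange_one_eq_nil (le_rfl : a ≤ a)]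
        · rw [if_neg (by omega)]
          have hsp : pvSplitFirst t (a :: rest)
              = (pvSplitFirst t rest).map (fun p => (a :: p.1, p.2)) := by
            simp [pvSplitFirst, Ne.symm h2]
          rw [hsp]
          cases hsr : pvSplitFirst t rest with
          | none => simp
          | some p =>
            simp only [Option.map_some]
            have hLiff : pvExtL t (p.1.reverse ++ (PySem.List.pyRange a (a + 1) 1).reverse)
                = pvExtL t ((a :: p.1).reverse ++ (PySem.List.pyRange s (prev + 1) 1).reverse) := by
              have h3 : (PySem.List.pyRange a (a + 1) 1).reverse = [a] := by
                rw [PySem.List.pyRange_one_singleton]; simp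
              have h4 : (a :: p.1).reverse ++ (PySem.List.pyRange s (prev + 1) 1).reverse
                  = p.1.reverse ++ ([a] ++ (PySem.List.pyRange s (prev + 1) 1).reverse) := by simp
              rw [h3, h4, pvExtL_append, pvExtL_append]
              have h5 : pvExtL (t - (p.1.reverse.length : Int)) [a]
                  = pvExtL (t - (p.1.reverse.length : Int)) ([a] ++ (PySem.List.pyRange s (prev + 1) 1).reverse) := by
                simp only [pvExtL, List.cons_append, List.nil_append]
                by_cases h6 : a + 1 = t - (p.1.reverse.length : Int)
                · rw [if_pos h6, if_pos h6, pvExtL_rev_range_nil hs hbr]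
                · rw [if_neg h6, if_neg h6]
              rw [h5]
            rw [hLiff]

-- ===== VERDICT (by name: the statement is the Claim_ definition above) =====
theorem find_continuous_subarray_spec : Claim_equal_find_continuous_subarray := by
  intro arr target _
  unfold Spec_find_continuous_subarray
  cases arr with
  | nil => simp [find_continuous_subarray, find_continuous_subarray_alt]
  | cons a0 rest =>
    rw [pvA_eq, pvB_eq, pvG target rest a0 a0 le_rfl]
    unfold pvBStruct
    by_cases h2 : target = a0
    · rw [if_pos (by omega : a0 ≤ target ∧ target ≤ a0)]
      have hsp : pvSplitFirst target (a0 :: rest) = some ([], rest) := by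
        simp [pvSplitFirst, h2]
      rw [hsp]
      simp only [List.reverse_nil, pvExtL, List.reverse_nil]
      rw [h2, PySem.List.pyRange_one_singleton]
      simp
    · rw [if_neg (by omega)]
      have hsp : pvSplitFirst target (a0 :: rest)
          = (pvSplitFirst target rest).map (fun p => (a0 :: p.1, p.2)) := by
        simp [pvSplitFirst, Ne.symm h2]
      rw [hsp]
      cases hsr : pvSplitFirst target rest with
      | none => simp
      | some p =>
        simp only [Option.map_some]
        have h3 : (PySem.List.pyRange a0 (a0 + 1) 1).reverse = [a0] := by
          rw [PySem.List.pyRange_one_singleton]; simp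
        have h4 : (a0 :: p.1).reverse = p.1.reverse ++ [a0] := by simp
        rw [h3, h4]
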